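-- pv_equiv track=rewrite | github.com/richardtomsett/interpretability_framework | flask_services/ExplanationsAAS.py | getThreeGreatestRegion
-- ===== SOURCE A (Python) =====
-- def getThreeGreatestRegion(average_list):
-- 	region1 = (0, 0)
-- 	region2 = (0, 0)
-- 	region3 = (0, 0)
-- 	for i in range(len(average_list)):
-- 		if abs(average_list[i][1]) > abs(region1[1]):
-- 			region3 = region2
-- 			region2 = region1
-- 			region1 = average_list[i]
-- 		elif abs(average_list[i][1]) > abs(region2[1]):
-- 			region3 = region2
-- 			region2 = average_list[i]
-- 		elif abs(average_list[i][1]) > abs(region3[1]):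
-- 			region3 = average_list[i]
-- 	return region1, region2, region3
-- ===== SOURCE B (Python) =====
-- def getThreeGreatestRegion(average_list):
--     ranked = sorted(average_list, key=lambda t: abs(t[1]), reverse=True)
--     top = [t for t in ranked if abs(t[1]) > 0][:3]
--     top += [(0, 0)] * (3 - len(top))
--     return top[0], top[1], top[2]
-- ===== Notes on version B (the rewrite author's own statement) =====
-- stated objective: simpler
-- what changed: Replaces A's per-element compare-and-shift of three ranked slots by a stable sort on abs(second field) descending followed by taking the first three nonzero-magnitude entries, padded with (0,0).
import Mathlib
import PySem

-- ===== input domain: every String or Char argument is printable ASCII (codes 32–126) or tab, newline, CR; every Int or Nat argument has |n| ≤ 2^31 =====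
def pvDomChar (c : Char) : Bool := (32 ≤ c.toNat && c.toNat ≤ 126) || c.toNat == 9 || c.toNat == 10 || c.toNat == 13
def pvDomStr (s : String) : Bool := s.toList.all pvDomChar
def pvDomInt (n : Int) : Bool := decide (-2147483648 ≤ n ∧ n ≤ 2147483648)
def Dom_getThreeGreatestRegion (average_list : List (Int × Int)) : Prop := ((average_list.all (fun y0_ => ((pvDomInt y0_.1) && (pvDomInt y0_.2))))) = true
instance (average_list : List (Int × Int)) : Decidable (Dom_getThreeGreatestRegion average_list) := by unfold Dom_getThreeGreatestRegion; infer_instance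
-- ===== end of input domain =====

-- B replaces A's per-element compare-and-shift of three slots by a stable sort on |snd|
-- descending followed by taking the first three nonzero-magnitude entries (objective: simpler).

-- ===== PORT A =====
def pvStepA (s : (Int × Int) × (Int × Int) × (Int × Int)) (x : Int × Int) :
    (Int × Int) × (Int × Int) × (Int × Int) :=
  if |x.2| > |s.1.2| then (x, s.1, s.2.1)
  else if |x.2| > |s.2.1.2| then (s.1, x, s.2.1)
  else if |x.2| > |s.2.2.2| then (s.1, s.2.1, x)
  else s

def getThreeGreatestRegion (average_list : List (Int × Int)) : (Int × Int) × (Int × Int) × (Int × Int) :=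
  (PySem.List.pyRange 0 (PySem.List.len average_list) 1).foldl
    (fun s i => pvStepA s (PySem.List.pyGetD average_list i ((0 : Int), (0 : Int))))
    (((0 : Int), (0 : Int)), ((0 : Int), (0 : Int)), ((0 : Int), (0 : Int)))

-- ===== PORT B =====
def getThreeGreatestRegion_alt (average_list : List (Int × Int)) : (Int × Int) × (Int × Int) × (Int × Int) :=
  let ranked := PySem.List.sorted average_list (fun t => |t.2|) true
  let top := PySem.List.slice (ranked.filter (fun t => decide (|t.2| > 0))) none (some 3)
  let padded := top ++ List.replicate (3 - top.length) ((0 : Int), (0 : Int))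
  (PySem.List.pyGetD padded 0 ((0 : Int), (0 : Int)),
   PySem.List.pyGetD padded 1 ((0 : Int), (0 : Int)),
   PySem.List.pyGetD padded 2 ((0 : Int), (0 : Int)))

-- ===== PRECONDITION & SPEC =====
def Spec_getThreeGreatestRegion (average_list : List (Int × Int)) (out : (Int × Int) × (Int × Int) × (Int × Int)) : Prop := out = getThreeGreatestRegion_alt average_list
instance (average_list : List (Int × Int)) (out : (Int × Int) × (Int × Int) × (Int × Int)) : Decidable (Spec_getThreeGreatestRegion average_list out) := by unfold Spec_getThreeGreatestRegion; infer_instance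

-- ===== CLAIM (what is proved, stated in full; the proofs are below) =====
def Claim_equal_getThreeGreatestRegion : Prop := ∀ (average_list : List (Int × Int)), Dom_getThreeGreatestRegion average_list → Spec_getThreeGreatestRegion average_list (getThreeGreatestRegion average_list)

-- ===== LEMMAS AND PROOFS =====

-- the three result slots as a function of the (sorted, filtered) ranked list
def pvSpec3 (fm : List (Int × Int)) : (Int × Int) × (Int × Int) × (Int × Int) :=
  match fm with
  | [] => (((0 : Int), (0 : Int)), ((0 : Int), (0 : Int)), ((0 : Int), (0 : Int)))
  | [a] => (a, ((0 : Int), (0 : Int)), ((0 : Int), (0 : Int)))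
  | [a, b] => (a, b, ((0 : Int), (0 : Int)))
  | a :: b :: c :: _ => (a, b, c)

lemma pvStepA_zero (s : (Int × Int) × (Int × Int) × (Int × Int)) (x : Int × Int)
    (hx : |x.2| = 0) : pvStepA s x = s := by
  unfold pvStepA
  have h1 : ¬ |x.2| > |s.1.2| := by have := abs_nonneg s.1.2; omega
  have h2 : ¬ |x.2| > |s.2.1.2| := by have := abs_nonneg s.2.1.2; omega
  have h3 : ¬ |x.2| > |s.2.2.2| := by have := abs_nonneg s.2.2.2; omega
  simp [h1, h2, h3]

-- filtering out zero-magnitude entries commutes with the stable descending insertion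
lemma pvPred : (fun t : Int × Int => decide (|t.2| > 0)) = (fun t => !decide (t.2 = 0)) := by
  funext t; simp [abs_pos]

lemma pvFilter_insertBy (m : List (Int × Int)) (x : Int × Int)
    (hm : m.Pairwise (fun a b => |b.2| ≤ |a.2|)) (hx : |x.2| > 0) :
    (PySem.List.insertBy (fun a b => decide (|b.2| < |a.2|)) x m).filter (fun t => decide (|t.2| > 0))
      = PySem.List.insertBy (fun a b => decide (|b.2| < |a.2|)) x
          (m.filter (fun t => decide (|t.2| > 0))) := by
  have hx' : x.2 ≠ 0 := abs_pos.mp hx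
  induction m with
  | nil => simp [PySem.List.insertBy, hx']
  | cons y ys ih =>
    rcases List.pairwise_cons.mp hm with ⟨hy, hys⟩
    by_cases hb : |y.2| < |x.2|
    · by_cases hpy : |y.2| > 0
      · have hpy' : y.2 ≠ 0 := abs_pos.mp hpy
        simp [PySem.List.insertBy, hb, hpy', hx']
      · have hy0 : y.2 = 0 := abs_eq_zero.mp (by have := abs_nonneg y.2; omega)
        have hnil : ys.filter (fun t => !decide (t.2 = 0)) = [] := by
          rw [List.filter_eq_nil_iff]
          intro a ha
          have h1 := hy a ha
          rw [hy0] at h1; simp at h1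
          simp [h1]
        simp [PySem.List.insertBy, hb, hy0, hx', hnil]
    · have hpy : |y.2| > 0 := by omega
      have hpy' : y.2 ≠ 0 := abs_pos.mp hpy
      have ih' := ih hys
      rw [pvPred] at ih'
      simp [PySem.List.insertBy, hb, hpy', ih']

-- inserting a nonzero entry into the ranked list is exactly A's compare-and-shift step
lemma pvSpec3_insertBy (fm : List (Int × Int)) (x : Int × Int) (hx : |x.2| > 0) :
    pvSpec3 (PySem.List.insertBy (fun a b => decide (|b.2| < |a.2|)) x fm)
      = pvStepA (pvSpec3 fm) x := by
  match fm with
  | [] => simp [PySem.List.insertBy, pvSpec3, pvStepA, hx]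
  | [a] =>
    by_cases h1 : |a.2| < |x.2| <;>
      simp [PySem.List.insertBy, pvSpec3, pvStepA, h1, hx]
  | [a, b] =>
    by_cases h1 : |a.2| < |x.2|
    · simp [PySem.List.insertBy, pvSpec3, pvStepA, h1]
    · by_cases h2 : |b.2| < |x.2| <;>
        simp [PySem.List.insertBy, pvSpec3, pvStepA, h1, h2, hx]
  | a :: b :: c :: rest =>
    by_cases h1 : |a.2| < |x.2|
    · simp [PySem.List.insertBy, pvSpec3, pvStepA, h1]
    · by_cases h2 : |b.2| < |x.2|
      · simp [PySem.List.insertBy, pvSpec3, pvStepA, h1, h2]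
      · by_cases h3 : |c.2| < |x.2|
        · simp [PySem.List.insertBy, pvSpec3, pvStepA, h1, h2, h3]
        · cases hins : PySem.List.insertBy (fun a b => decide (|b.2| < |a.2|)) x rest <;>
            simp [PySem.List.insertBy, pvSpec3, pvStepA, h1, h2, h3, hins]

lemma pvSorted_append (l : List (Int × Int)) (x : Int × Int) :
    PySem.List.sorted (l ++ [x]) (fun t => |t.2|) true
      = PySem.List.insertBy (fun a b => decide (|b.2| < |a.2|)) x
          (PySem.List.sorted l (fun t => |t.2|) true) := by
  rw [PySem.List.sorted_rev_eq_foldl_insertBy, List.foldl_append, List.foldl_cons, List.foldl_nil,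
      ← PySem.List.sorted_rev_eq_foldl_insertBy]

lemma pvMain (l : List (Int × Int)) :
    l.foldl pvStepA (((0 : Int), (0 : Int)), ((0 : Int), (0 : Int)), ((0 : Int), (0 : Int)))
      = pvSpec3 ((PySem.List.sorted l (fun t => |t.2|) true).filter (fun t => decide (|t.2| > 0))) := by
  induction l using List.reverseRecOn with
  | nil => simp [PySem.List.sorted, pvSpec3]
  | append_singleton l x ih =>
    rw [List.foldl_append, List.foldl_cons, List.foldl_nil, ih, pvSorted_append]
    by_cases hx : |x.2| > 0
    · rw [pvFilter_insertBy _ _ (PySem.List.sorted_pairwise_rev l _) hx, pvSpec3_insertBy _ _ hx]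
    · have hx0 : |x.2| = 0 := by have := abs_nonneg x.2; omega
      rw [PySem.List.insertBy_of_forall_not_before _ _ _ (by intro y hy; have := abs_nonneg y.2; simp; omega),
          List.filter_append, pvStepA_zero _ _ hx0]
      have hx2 : x.2 = 0 := abs_eq_zero.mp hx0
      simp [hx2]

lemma pvPad (fm : List (Int × Int)) :
    ((PySem.List.pyGetD (fm.take 3 ++ List.replicate (3 - (fm.take 3).length) ((0 : Int), (0 : Int))) 0 ((0 : Int), (0 : Int)),
      PySem.List.pyGetD (fm.take 3 ++ List.replicate (3 - (fm.take 3).length) ((0 : Int), (0 : Int))) 1 ((0 : Int), (0 : Int)),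
      PySem.List.pyGetD (fm.take 3 ++ List.replicate (3 - (fm.take 3).length) ((0 : Int), (0 : Int))) 2 ((0 : Int), (0 : Int))))
      = pvSpec3 fm := by
  match fm with
  | [] => rfl
  | [a] => rfl
  | [a, b] => rfl
  | a :: b :: c :: _ =>
    simp [pvSpec3, PySem.List.pyGetD_ofNat']

lemma pvAlt_eq (l : List (Int × Int)) :
    getThreeGreatestRegion_alt l
      = pvSpec3 ((PySem.List.sorted l (fun t => |t.2|) true).filter (fun t => decide (|t.2| > 0))) := by
  simp only [getThreeGreatestRegion_alt]
  rw [PySem.List.slice_to _ (by norm_num : (0 : Int) ≤ 3)]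
  exact pvPad _

-- ===== VERDICT (by name: the statement is the Claim_ definition above) =====
theorem getThreeGreatestRegion_spec : Claim_equal_getThreeGreatestRegion := by
  intro l _
  unfold Spec_getThreeGreatestRegion getThreeGreatestRegion
  rw [PySem.List.foldl_pyRange_zero_pyGetD, pvMain, pvAlt_eq]
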